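-- pv_equiv track=rewrite | github.com/wanguliux/pythonstudy | 生成器.py | jc
-- ===== SOURCE A (Python) =====
-- def jc (n):
--     i,s,sn,k=0,0,1,1
--     while i<n:
--         sn*=k
--         s+=sn
--         k+=1
--         i+=1
--         yield s
-- ===== SOURCE B (Python) =====
-- def jc(n):
--     # recompute each factorial from scratch, accumulate the running sum
--     s = 0
--     for i in range(1, n + 1):
--         f = 1
--         for j in range(2, i + 1):
--             f *= j
--         s += f
--         yield s
-- ===== Notes on version B (the rewrite author's own statement) =====
-- stated objective: alternative
-- what changed: B drops A's threaded incremental product (sn *= k) and instead recomputes each factorial i! from scratch with an inner product loop before adding it to the running sum.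
import Mathlib
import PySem

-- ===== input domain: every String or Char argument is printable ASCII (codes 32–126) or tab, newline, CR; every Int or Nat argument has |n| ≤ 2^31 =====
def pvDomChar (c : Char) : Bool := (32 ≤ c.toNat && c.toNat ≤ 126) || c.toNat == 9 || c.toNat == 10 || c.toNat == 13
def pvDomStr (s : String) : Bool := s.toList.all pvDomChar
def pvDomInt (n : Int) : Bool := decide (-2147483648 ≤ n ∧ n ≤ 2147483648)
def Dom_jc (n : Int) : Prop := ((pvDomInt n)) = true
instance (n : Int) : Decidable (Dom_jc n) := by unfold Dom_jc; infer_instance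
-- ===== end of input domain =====

-- B replaces A's threaded incremental factorial (sn *= k) by recomputing each
-- factorial from scratch with an inner product loop (objective: alternative).

-- ===== PORT A =====
-- while i < n: sn *= k; s += sn; k += 1; i += 1; yield s
def jcGo (n i s sn k : Int) : List Int :=
  if _h : i < n then
    let sn' := sn * k
    let s' := s + sn'
    s' :: jcGo n (i + 1) s' sn' (k + 1)
  else []
termination_by (n - i).toNat
decreasing_by omega

def jc (n : Int) : List Int := jcGo n 0 0 1 1

-- ===== PORT B =====
-- inner loop: f = 1; for j in range(2, i+1): f *= j
def jcFact (i : Int) : Int := (PySem.List.pyRange 2 (i + 1) 1).foldl (fun f j => f * j) 1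

-- outer loop: for i in range(1, n+1): s += jcFact i; yield s
def jcAltGo : List Int → Int → List Int
  | [], _ => []
  | i :: rest, s =>
    let f := jcFact i
    let s' := s + f
    s' :: jcAltGo rest s'

def jc_alt (n : Int) : List Int := jcAltGo (PySem.List.pyRange 1 (n + 1) 1) 0

-- ===== PRECONDITION & SPEC =====
def Spec_jc (n : Int) (out : List Int) : Prop := out = jc_alt n
instance (n : Int) (out : List Int) : Decidable (Spec_jc n out) := by unfold Spec_jc; infer_instance

-- ===== CLAIM (what is proved, stated in full; the proofs are below) =====
def Claim_equal_jc : Prop := ∀ (n : Int), Dom_jc n → Spec_jc n (jc n)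

-- ===== LEMMAS AND PROOFS =====

theorem jcFact_succ (i : Int) (h : 0 ≤ i) : jcFact (i + 1) = jcFact i * (i + 1) := by
  rcases eq_or_lt_of_le h with h0 | h1
  · subst h0
    simp [jcFact, PySem.List.pyRange_one_eq_nil]
  · unfold jcFact
    rw [show i + 1 + 1 = (i + 1) + 1 from rfl,
        PySem.List.pyRange_one_succ_right (by omega : (2:Int) ≤ i + 1)]
    simp

theorem jcGo_eq (c : Nat) : ∀ (n i s : Int), (n - i).toNat = c → 0 ≤ i →
    jcGo n i s (jcFact i) (i + 1) = jcAltGo (PySem.List.pyRange (i + 1) (n + 1) 1) s := by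
  induction c with
  | zero =>
    intro n i s hc hi
    rw [jcGo, PySem.List.pyRange_one_eq_nil (by omega)]
    simp [show ¬ i < n by omega, jcAltGo]
  | succ c ih =>
    intro n i s hc hi
    rw [jcGo, PySem.List.pyRange_one_cons (by omega : i + 1 < n + 1)]
    simp only [show i < n from by omega, dif_pos, jcAltGo]
    rw [← jcFact_succ i hi]
    exact congrArg _ (ih n (i + 1) (s + jcFact (i + 1)) (by omega) (by omega))

theorem jcFact_zero : jcFact 0 = 1 := by
  simp [jcFact, PySem.List.pyRange_one_eq_nil (by norm_num : (1:Int) ≤ 2)]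

-- ===== VERDICT (by name: the statement is the Claim_ definition above) =====
theorem jc_spec : Claim_equal_jc := by
  intro n _
  unfold Spec_jc jc jc_alt
  have := jcGo_eq (n - 0).toNat n 0 0 rfl le_rfl
  rw [jcFact_zero] at this
  simpa using this
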